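-- pv_equiv track=rewrite | github.com/jiangyi15/tf-pwa | tf_pwa/einsum.py | _get_order_bound_list
-- ===== SOURCE A (Python) =====
-- def _get_order_bound_list(bd_dict, ord_dict, idx, left=0):
--     if idx in ord_dict:
--         return [ord_dict[idx]]
--     assert idx in bd_dict, "not found"
--     bd = bd_dict[idx]
--     od = []
--     for i in bd[left]:
--         if i in ord_dict:
--             od.append(ord_dict[i])
--         else:
--             od += _get_order_bound_list(bd_dict, ord_dict, i, left)
--     return od
-- ===== SOURCE B (Python) =====
-- def _get_order_bound_list(bd_dict, ord_dict, idx, left=0):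
--     if idx in ord_dict:
--         return [ord_dict[idx]]
--     assert idx in bd_dict, "not found"
--     od = []
--     stack = list(reversed(bd_dict[idx][left]))
--     while stack:
--         i = stack.pop()
--         if i in ord_dict:
--             od.append(ord_dict[i])
--         else:
--             assert i in bd_dict, "not found"
--             stack.extend(reversed(bd_dict[i][left]))
--     return od
-- ===== Notes on version B (the rewrite author's own statement) =====
-- stated objective: alternative
-- what changed: The recursive left-to-right DFS flattening is replaced by an iterative loop over an explicit stack (children pushed reversed so pop order preserves the left-to-right output order), removing all recursive calls.
import Mathlib
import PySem

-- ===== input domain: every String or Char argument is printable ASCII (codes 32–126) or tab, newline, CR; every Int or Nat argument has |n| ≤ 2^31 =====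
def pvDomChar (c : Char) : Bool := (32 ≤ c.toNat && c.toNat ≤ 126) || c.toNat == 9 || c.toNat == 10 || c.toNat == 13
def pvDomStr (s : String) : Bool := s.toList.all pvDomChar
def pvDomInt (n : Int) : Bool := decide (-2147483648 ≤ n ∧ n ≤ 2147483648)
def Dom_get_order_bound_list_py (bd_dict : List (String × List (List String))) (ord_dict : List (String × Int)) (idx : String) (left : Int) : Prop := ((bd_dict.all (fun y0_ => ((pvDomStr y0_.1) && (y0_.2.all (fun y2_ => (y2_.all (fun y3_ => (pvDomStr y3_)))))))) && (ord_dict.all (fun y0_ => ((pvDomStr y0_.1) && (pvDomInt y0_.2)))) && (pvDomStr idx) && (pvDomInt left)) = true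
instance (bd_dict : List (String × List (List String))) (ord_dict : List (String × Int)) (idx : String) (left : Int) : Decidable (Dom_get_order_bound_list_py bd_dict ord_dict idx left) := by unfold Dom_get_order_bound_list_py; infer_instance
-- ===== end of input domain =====

-- B replaces the recursive left-to-right DFS flattening by an iterative loop over an explicit
-- stack (children pushed reversed), same values in the same order; objective: alternative.

-- Python dict lookup (first match in the association list)
def alook {α : Type} (d : List (String × α)) (k : String) : Option α :=
  match d with
  | [] => none
  | (k', v) :: rest => if k' = k then some v else alook rest k

-- ===== PORT A =====
-- fueled transliteration of A's recursion; fuel bd_dict.length + 1 is enough under Pre_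
def aRec (bd_dict : List (String × List (List String))) (ord_dict : List (String × Int)) (left : Int) : Nat → String → List Int
  | 0, _ => []                                    -- fuel exhausted: unreachable under Pre_
  | f + 1, idx =>
    match alook ord_dict idx with
    | some v => [v]                               -- if idx in ord_dict: return [ord_dict[idx]]
    | none =>
      match alook bd_dict idx with
      | none => []                                -- assert idx in bd_dict fails: excluded by Pre_
      | some bd =>
        match PySem.List.pyGet? bd left with
        | none => []                              -- IndexError on bd[left]: excluded by Pre_
        | some row =>                             -- for i in bd[left]: append/extend
          row.foldl (fun od i =>
            od ++ (match alook ord_dict i with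
                   | some v => [v]
                   | none => aRec bd_dict ord_dict left f i)) []

def get_order_bound_list_py (bd_dict : List (String × List (List String))) (ord_dict : List (String × Int)) (idx : String) (left : Int) : List Int :=
  aRec bd_dict ord_dict left (bd_dict.length + 1) idx

-- ===== PORT B =====
-- fuel bound for the stack loop: M = 1 + total length of all rows, fuel = M ^ (length + 1)
def bMax (bd_dict : List (String × List (List String))) (left : Int) : Nat :=
  bd_dict.foldl (fun a p => a + ((PySem.List.pyGet? p.2 left).getD []).length) 1

def bFuel (bd_dict : List (String × List (List String))) (left : Int) : Nat :=
  (bMax bd_dict left) ^ (bd_dict.length + 1)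

-- the while loop over the explicit stack; stack top at the HEAD here, so Python's
-- 'stack.extend(reversed(row))' followed by pop-from-the-end is exactly 'row ++ s'
def bLoop (bd_dict : List (String × List (List String))) (ord_dict : List (String × Int)) (left : Int) : Nat → List String → List Int → List Int
  | 0, _, od => od                                -- fuel exhausted: unreachable under Pre_
  | _ + 1, [], od => od                           -- while stack: loop ends
  | f + 1, i :: s, od =>
    match alook ord_dict i with
    | some v => bLoop bd_dict ord_dict left f s (od ++ [v])   -- od.append(ord_dict[i])
    | none =>
      match alook bd_dict i with
      | none => od                                -- assert i in bd_dict fails: excluded by Pre_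
      | some bd =>
        match PySem.List.pyGet? bd left with
        | none => od                              -- IndexError: excluded by Pre_
        | some row => bLoop bd_dict ord_dict left f (row ++ s) od

def get_order_bound_list_py_alt (bd_dict : List (String × List (List String))) (ord_dict : List (String × Int)) (idx : String) (left : Int) : List Int :=
  match alook ord_dict idx with
  | some v => [v]
  | none =>
    match alook bd_dict idx with
    | none => []
    | some bd =>
      match PySem.List.pyGet? bd left with
      | none => []
      | some row => bLoop bd_dict ord_dict left (bFuel bd_dict left) row []

-- ===== PRECONDITION & SPEC =====
-- Reference graph used by Pre_: nxt k lists the indices k's row refers on to (those not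
-- answered by ord_dict); reachS S is the set of indices reachable from S in that graph
-- (iterated one-step expansion, run enough times to saturate — a property of the input
-- graph, not a run of either algorithm).
def nxt (bd_dict : List (String × List (List String))) (ord_dict : List (String × Int)) (left : Int) (k : String) : List String :=
  ((PySem.List.pyGet? ((alook bd_dict k).getD []) left).getD []).filter (fun i => (alook ord_dict i).isNone)

def stepS (bd_dict : List (String × List (List String))) (ord_dict : List (String × Int)) (left : Int) (S : List String) : List String :=
  (S ++ S.flatMap (nxt bd_dict ord_dict left)).dedup

def iterS (bd_dict : List (String × List (List String))) (ord_dict : List (String × Int)) (left : Int) : Nat → List String → List String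
  | 0, S => S
  | n + 1, S => iterS bd_dict ord_dict left n (stepS bd_dict ord_dict left S)

def bigU (bd_dict : List (String × List (List String))) : List String :=
  bd_dict.flatMap (fun p => p.2.flatMap (fun r => r))

def reachS (bd_dict : List (String × List (List String))) (ord_dict : List (String × Int)) (left : Int) (S : List String) : List String :=
  iterS bd_dict ord_dict left ((S ++ bigU bd_dict).length + 1) S

-- Pre_ holds exactly when A returns: it excludes the inputs on which A raises — an index
-- reached from idx that is in neither dict (AssertionError), a reached bd_dict entry with
-- no row at position left (IndexError), and a cycle among the reached indices (unbounded
-- recursion, RecursionError).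
def Pre_get_order_bound_list_py (bd_dict : List (String × List (List String))) (ord_dict : List (String × Int)) (idx : String) (left : Int) : Prop :=
  (alook ord_dict idx).isSome = true ∨
  ((alook bd_dict idx).isSome = true ∧
    (∀ k ∈ reachS bd_dict ord_dict left [idx], (alook ord_dict k).isNone = true →
      (alook bd_dict k).isSome = true ∧
      (PySem.List.pyGet? ((alook bd_dict k).getD []) left).isSome = true) ∧
    (∀ k ∈ reachS bd_dict ord_dict left [idx], k ∉ reachS bd_dict ord_dict left (nxt bd_dict ord_dict left k)))
instance (bd_dict : List (String × List (List String))) (ord_dict : List (String × Int)) (idx : String) (left : Int) : Decidable (Pre_get_order_bound_list_py bd_dict ord_dict idx left) := by unfold Pre_get_order_bound_list_py; infer_instance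

def pvWitness_get_order_bound_list_py : (List (String × List (List String))) × (List (String × Int)) × String × Int :=
  ([("a", [["x", "b"]]), ("b", [["y"]])], [("x", 3), ("y", 4)], "a", 0)

def Spec_get_order_bound_list_py (bd_dict : List (String × List (List String))) (ord_dict : List (String × Int)) (idx : String) (left : Int) (out : List Int) : Prop := out = get_order_bound_list_py_alt bd_dict ord_dict idx left
instance (bd_dict : List (String × List (List String))) (ord_dict : List (String × Int)) (idx : String) (left : Int) (out : List Int) : Decidable (Spec_get_order_bound_list_py bd_dict ord_dict idx left out) := by unfold Spec_get_order_bound_list_py; infer_instance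

-- ===== CLAIM (what is proved, stated in full; the proofs are below) =====
def Claim_equal_get_order_bound_list_py : Prop := ∀ (bd_dict : List (String × List (List String))) (ord_dict : List (String × Int)) (idx : String) (left : Int), Dom_get_order_bound_list_py bd_dict ord_dict idx left → Pre_get_order_bound_list_py bd_dict ord_dict idx left → Spec_get_order_bound_list_py bd_dict ord_dict idx left (get_order_bound_list_py bd_dict ord_dict idx left)

-- ===== LEMMAS AND PROOFS =====

-- rank of an index: the number of distinct indices reachable from its successors
def rnk (bd_dict : List (String × List (List String))) (ord_dict : List (String × Int)) (left : Int) (k : String) : Nat :=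
  (reachS bd_dict ord_dict left (nxt bd_dict ord_dict left k)).toFinset.card

-- the common value of both programs at an index: A's recursion with full fuel
def VAL (bd_dict : List (String × List (List String))) (ord_dict : List (String × Int)) (left : Int) (k : String) : List Int :=
  aRec bd_dict ord_dict left (bd_dict.length + 1) k

-- what the fuel inductions consume, distilled from Pre_: every reached index not in
-- ord_dict has a row, and each of its row members is in ord_dict or is reached, in
-- bd_dict, and of strictly smaller rank
def HB (bd_dict : List (String × List (List String))) (ord_dict : List (String × Int)) (left : Int) (idx : String) : Prop :=
  ∀ k, k ∈ reachS bd_dict ord_dict left [idx] → alook ord_dict k = none →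
    ∃ ls, alook bd_dict k = some ls ∧ ∃ row, PySem.List.pyGet? ls left = some row ∧
      ∀ i ∈ row, (alook ord_dict i).isSome = true ∨
        (i ∈ reachS bd_dict ord_dict left [idx] ∧ (alook bd_dict i).isSome = true ∧
          rnk bd_dict ord_dict left i < rnk bd_dict ord_dict left k)

theorem alook_mem {α : Type} (d : List (String × α)) (k : String) (v : α) (h : alook d k = some v) : (k, v) ∈ d := by
  induction d with
  | nil => simp [alook] at h
  | cons p rest ih =>
    obtain ⟨k', v'⟩ := p
    simp only [alook] at h
    by_cases hk : k' = k
    · subst hk; simp at h; simp [h]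
    · simp [hk] at h; exact List.mem_cons_of_mem _ (ih h)

theorem mem_stepS (bd_dict : List (String × List (List String))) (ord_dict : List (String × Int)) (left : Int) (S : List String) (x : String) :
    x ∈ stepS bd_dict ord_dict left S ↔ x ∈ S ∨ ∃ y ∈ S, x ∈ nxt bd_dict ord_dict left y := by
  simp [stepS]

theorem stepS_congr (bd_dict : List (String × List (List String))) (ord_dict : List (String × Int)) (left : Int) (S T : List String)
    (h : ∀ x, x ∈ S ↔ x ∈ T) (x : String) :
    x ∈ stepS bd_dict ord_dict left S ↔ x ∈ stepS bd_dict ord_dict left T := by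
  simp only [mem_stepS]
  constructor
  · rintro (hx | ⟨y, hy, hx⟩)
    · exact Or.inl ((h x).mp hx)
    · exact Or.inr ⟨y, (h y).mp hy, hx⟩
  · rintro (hx | ⟨y, hy, hx⟩)
    · exact Or.inl ((h x).mpr hx)
    · exact Or.inr ⟨y, (h y).mpr hy, hx⟩

theorem iterS_congr (bd_dict : List (String × List (List String))) (ord_dict : List (String × Int)) (left : Int) :
    ∀ (n : Nat) (S T : List String), (∀ x, x ∈ S ↔ x ∈ T) →
      ∀ x, x ∈ iterS bd_dict ord_dict left n S ↔ x ∈ iterS bd_dict ord_dict left n T := by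
  intro n
  induction n with
  | zero => intro S T h x; exact h x
  | succ n ih =>
    intro S T h x
    exact ih _ _ (stepS_congr bd_dict ord_dict left S T h) x

theorem iterS_step_comm (bd_dict : List (String × List (List String))) (ord_dict : List (String × Int)) (left : Int) :
    ∀ (n : Nat) (S : List String),
      iterS bd_dict ord_dict left n (stepS bd_dict ord_dict left S) =
      stepS bd_dict ord_dict left (iterS bd_dict ord_dict left n S) := by
  intro n
  induction n with
  | zero => intro S; rfl
  | succ n ih => intro S; exact ih (stepS bd_dict ord_dict left S)

theorem iterS_succ (bd_dict : List (String × List (List String))) (ord_dict : List (String × Int)) (left : Int) (n : Nat) (S : List String) :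
    iterS bd_dict ord_dict left (n + 1) S = stepS bd_dict ord_dict left (iterS bd_dict ord_dict left n S) :=
  iterS_step_comm bd_dict ord_dict left n S

theorem iterS_add (bd_dict : List (String × List (List String))) (ord_dict : List (String × Int)) (left : Int) :
    ∀ (a b : Nat) (S : List String),
      iterS bd_dict ord_dict left (a + b) S =
      iterS bd_dict ord_dict left a (iterS bd_dict ord_dict left b S) := by
  intro a b
  induction b generalizing a with
  | zero => intro S; rfl
  | succ b ih => intro S; exact ih a (stepS bd_dict ord_dict left S)

theorem mem_iterS_of_mem (bd_dict : List (String × List (List String))) (ord_dict : List (String × Int)) (left : Int) :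
    ∀ (n : Nat) (S : List String) (x : String), x ∈ S → x ∈ iterS bd_dict ord_dict left n S := by
  intro n
  induction n with
  | zero => intro S x hx; exact hx
  | succ n ih =>
    intro S x hx
    exact ih _ x ((mem_stepS bd_dict ord_dict left S x).mpr (Or.inl hx))

theorem iterS_stable (bd_dict : List (String × List (List String))) (ord_dict : List (String × Int)) (left : Int) :
    ∀ (n : Nat) (S : List String),
      (∀ x, x ∈ stepS bd_dict ord_dict left S ↔ x ∈ S) →
      ∀ x, x ∈ iterS bd_dict ord_dict left n S ↔ x ∈ S := by
  intro n
  induction n with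
  | zero => intro S _ x; rfl
  | succ n ih =>
    intro S h x
    have h1 : x ∈ iterS bd_dict ord_dict left n (stepS bd_dict ord_dict left S) ↔
        x ∈ iterS bd_dict ord_dict left n S :=
      iterS_congr bd_dict ord_dict left n _ _ h x
    exact h1.trans (ih S h x)

theorem mem_nxt_bigU (bd_dict : List (String × List (List String))) (ord_dict : List (String × Int)) (left : Int) (k i : String)
    (h : i ∈ nxt bd_dict ord_dict left k) : i ∈ bigU bd_dict := by
  unfold nxt at h
  have hi := (List.mem_filter.mp h).1
  rcases hls : alook bd_dict k with _ | ls
  · simp [hls, PySem.List.pyGet?] at hi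
  · rw [hls] at hi
    simp only [Option.getD_some] at hi
    rcases hrow : PySem.List.pyGet? ls left with _ | row
    · simp [hrow] at hi
    · rw [hrow] at hi
      simp only [Option.getD_some] at hi
      have hrls : row ∈ ls := PySem.List.mem_of_pyGet?_eq_some (xs := ls) (i := left) (x := row) hrow
      unfold bigU
      exact List.mem_flatMap.mpr ⟨(k, ls), alook_mem _ _ _ hls, List.mem_flatMap.mpr ⟨row, hrls, hi⟩⟩

theorem iterS_subset_univ (bd_dict : List (String × List (List String))) (ord_dict : List (String × Int)) (left : Int) :
    ∀ (n : Nat) (S : List String) (x : String), x ∈ iterS bd_dict ord_dict left n S →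
      x ∈ S ∨ x ∈ bigU bd_dict := by
  intro n
  induction n with
  | zero => intro S x hx; exact Or.inl hx
  | succ n ih =>
    intro S x hx
    rcases ih _ x hx with hx' | hx'
    · rcases (mem_stepS bd_dict ord_dict left S x).mp hx' with hx'' | ⟨y, _, hx''⟩
      · exact Or.inl hx''
      · exact Or.inr (mem_nxt_bigU bd_dict ord_dict left y x hx'')
    · exact Or.inr hx'

theorem iterS_closed (bd_dict : List (String × List (List String))) (ord_dict : List (String × Int)) (left : Int) (T : List String)
    (hT : ∀ x ∈ T, ∀ i ∈ nxt bd_dict ord_dict left x, i ∈ T) :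
    ∀ (n : Nat) (S : List String), (∀ x ∈ S, x ∈ T) →
      ∀ x, x ∈ iterS bd_dict ord_dict left n S → x ∈ T := by
  intro n
  induction n with
  | zero => intro S hS x hx; exact hS x hx
  | succ n ih =>
    intro S hS x hx
    refine ih _ ?_ x hx
    intro y hy
    rcases (mem_stepS bd_dict ord_dict left S y).mp hy with hy' | ⟨z, hz, hy'⟩
    · exact hS y hy'
    · exact hT z (hS z hz) y hy'

-- pigeonhole: along the expansion chain some step adds nothing
theorem exists_stable_step (bd_dict : List (String × List (List String))) (ord_dict : List (String × Int)) (left : Int) (S : List String) :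
    ∃ n ≤ (S ++ bigU bd_dict).length,
      ∀ x, x ∈ iterS bd_dict ord_dict left (n + 1) S ↔ x ∈ iterS bd_dict ord_dict left n S := by
  by_contra hc
  push Not at hc
  have key : ∀ n, n ≤ (S ++ bigU bd_dict).length + 1 →
      n ≤ (iterS bd_dict ord_dict left n S).toFinset.card := by
    intro n
    induction n with
    | zero => intro _; omega
    | succ n ih =>
      intro hn
      obtain ⟨x, hx⟩ := hc n (by omega)
      have hsub : (iterS bd_dict ord_dict left n S).toFinset ⊆
          (iterS bd_dict ord_dict left (n + 1) S).toFinset := by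
        intro y hy
        rw [List.mem_toFinset] at hy ⊢
        rw [iterS_succ]
        exact (mem_stepS bd_dict ord_dict left _ y).mpr (Or.inl hy)
      have hlt : (iterS bd_dict ord_dict left n S).toFinset.card <
          (iterS bd_dict ord_dict left (n + 1) S).toFinset.card := by
        apply Finset.card_lt_card
        refine ⟨hsub, fun hsub' => ?_⟩
        rcases hx with ⟨h1, h2⟩ | ⟨h1, h2⟩
        · exact h2 (List.mem_toFinset.mp (hsub' (List.mem_toFinset.mpr h1)))
        · exact h1 (List.mem_toFinset.mp (hsub (List.mem_toFinset.mpr h2)))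
      have := ih (by omega)
      omega
  have hend := key ((S ++ bigU bd_dict).length + 1) (by omega)
  have hle : (iterS bd_dict ord_dict left ((S ++ bigU bd_dict).length + 1) S).toFinset.card ≤
      (S ++ bigU bd_dict).length := by
    calc (iterS bd_dict ord_dict left ((S ++ bigU bd_dict).length + 1) S).toFinset.card
        ≤ (S ++ bigU bd_dict).toFinset.card := by
          apply Finset.card_le_card
          intro y hy
          rw [List.mem_toFinset] at hy ⊢
          rcases iterS_subset_univ bd_dict ord_dict left _ S y hy with h | h
          · exact List.mem_append.mpr (Or.inl h)
          · exact List.mem_append.mpr (Or.inr h)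
      _ ≤ (S ++ bigU bd_dict).length := List.toFinset_card_le _
  omega

theorem reachS_saturated (bd_dict : List (String × List (List String))) (ord_dict : List (String × Int)) (left : Int) (S : List String)
    (x : String) (hx : x ∈ reachS bd_dict ord_dict left S)
    (i : String) (hi : i ∈ nxt bd_dict ord_dict left x) :
    i ∈ reachS bd_dict ord_dict left S := by
  obtain ⟨n, hn, hstab⟩ := exists_stable_step bd_dict ord_dict left S
  -- iterS (n+1) S = stepS (iterS n S); stability means stepS adds nothing at step n
  have hstep : ∀ y, y ∈ stepS bd_dict ord_dict left (iterS bd_dict ord_dict left n S) ↔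
      y ∈ iterS bd_dict ord_dict left n S := by
    intro y
    have := hstab y
    rwa [iterS_succ] at this
  -- reachS S has the same members as iterS n S
  have hsame : ∀ y, y ∈ reachS bd_dict ord_dict left S ↔ y ∈ iterS bd_dict ord_dict left n S := by
    intro y
    unfold reachS
    obtain ⟨m, hm⟩ : ∃ m, (S ++ bigU bd_dict).length + 1 = m + n := ⟨(S ++ bigU bd_dict).length + 1 - n, by omega⟩
    rw [hm, iterS_add bd_dict ord_dict left m n S]
    exact iterS_stable bd_dict ord_dict left m _ hstep y
  rw [hsame] at hx ⊢
  exact (hstep i).mp ((mem_stepS bd_dict ord_dict left _ i).mpr (Or.inr ⟨x, hx, hi⟩))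

-- reachS of a subset of a closed saturated set stays inside it
theorem reachS_subset_closed (bd_dict : List (String × List (List String))) (ord_dict : List (String × Int)) (left : Int)
    (S T : List String)
    (hT : ∀ x ∈ T, ∀ i ∈ nxt bd_dict ord_dict left x, i ∈ T)
    (hS : ∀ x ∈ S, x ∈ T) (x : String) (hx : x ∈ reachS bd_dict ord_dict left S) : x ∈ T :=
  iterS_closed bd_dict ord_dict left T hT _ S hS x hx

-- all members of reachS S are ord-free when S is
theorem reachS_ord_none (bd_dict : List (String × List (List String))) (ord_dict : List (String × Int)) (left : Int) :
    ∀ (n : Nat) (S : List String), (∀ x ∈ S, (alook ord_dict x).isNone = true) →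
      ∀ x, x ∈ iterS bd_dict ord_dict left n S → (alook ord_dict x).isNone = true := by
  intro n
  induction n with
  | zero => intro S hS x hx; exact hS x hx
  | succ n ih =>
    intro S hS x hx
    refine ih _ ?_ x hx
    intro y hy
    rcases (mem_stepS bd_dict ord_dict left S y).mp hy with hy' | ⟨z, _, hy'⟩
    · exact hS y hy'
    · exact (List.mem_filter.mp hy').2

theorem nxt_ord_none (bd_dict : List (String × List (List String))) (ord_dict : List (String × Int)) (left : Int) (k x : String)
    (hx : x ∈ nxt bd_dict ord_dict left k) : (alook ord_dict x).isNone = true :=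
  (List.mem_filter.mp hx).2

-- mem of row characterizes nxt
theorem mem_nxt_iff (bd_dict : List (String × List (List String))) (ord_dict : List (String × Int)) (left : Int)
    (k : String) (ls : List (List String)) (row : List String)
    (hls : alook bd_dict k = some ls) (hrow : PySem.List.pyGet? ls left = some row) (i : String) :
    i ∈ nxt bd_dict ord_dict left k ↔ (i ∈ row ∧ (alook ord_dict i).isNone = true) := by
  unfold nxt
  rw [hls, Option.getD_some, hrow, Option.getD_some, List.mem_filter]

-- rank strictly decreases along edges among reached acyclic indices
theorem rnk_lt (bd_dict : List (String × List (List String))) (ord_dict : List (String × Int)) (left : Int) (idx : String)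
    (hacyc : ∀ k ∈ reachS bd_dict ord_dict left [idx], k ∉ reachS bd_dict ord_dict left (nxt bd_dict ord_dict left k))
    (k i : String) (hk : k ∈ reachS bd_dict ord_dict left [idx])
    (hi : i ∈ nxt bd_dict ord_dict left k) :
    rnk bd_dict ord_dict left i < rnk bd_dict ord_dict left k := by
  have hiR : i ∈ reachS bd_dict ord_dict left [idx] :=
    reachS_saturated bd_dict ord_dict left [idx] k hk i hi
  -- P := reachS (nxt k), Pi := reachS (nxt i)
  have hiP : i ∈ reachS bd_dict ord_dict left (nxt bd_dict ord_dict left k) :=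
    mem_iterS_of_mem bd_dict ord_dict left _ _ i hi
  have hPclosed : ∀ x ∈ reachS bd_dict ord_dict left (nxt bd_dict ord_dict left k),
      ∀ j ∈ nxt bd_dict ord_dict left x, j ∈ reachS bd_dict ord_dict left (nxt bd_dict ord_dict left k) :=
    fun x hx j hj => reachS_saturated bd_dict ord_dict left _ x hx j hj
  have hPiP : ∀ x, x ∈ reachS bd_dict ord_dict left (nxt bd_dict ord_dict left i) →
      x ∈ reachS bd_dict ord_dict left (nxt bd_dict ord_dict left k) :=
    fun x hx => reachS_subset_closed bd_dict ord_dict left _ _ hPclosed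
      (fun y hy => hPclosed i hiP y hy) x hx
  have hiPi : i ∉ reachS bd_dict ord_dict left (nxt bd_dict ord_dict left i) := hacyc i hiR
  unfold rnk
  apply Finset.card_lt_card
  constructor
  · intro y hy
    rw [List.mem_toFinset] at hy ⊢
    exact hPiP y hy
  · intro hsub
    exact hiPi (List.mem_toFinset.mp (hsub (List.mem_toFinset.mpr hiP)))

-- rank is bounded by bd_dict.length for reached indices, given well-formedness
theorem rnk_le (bd_dict : List (String × List (List String))) (ord_dict : List (String × Int)) (left : Int) (idx : String)
    (hwf : ∀ k ∈ reachS bd_dict ord_dict left [idx], (alook ord_dict k).isNone = true →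
      (alook bd_dict k).isSome = true ∧
      (PySem.List.pyGet? ((alook bd_dict k).getD []) left).isSome = true)
    (k : String) (hk : k ∈ reachS bd_dict ord_dict left [idx]) :
    rnk bd_dict ord_dict left k ≤ bd_dict.length := by
  have hsub : (reachS bd_dict ord_dict left (nxt bd_dict ord_dict left k)).toFinset ⊆
      (bd_dict.map Prod.fst).toFinset := by
    intro y hy
    rw [List.mem_toFinset] at hy ⊢
    have hyR : y ∈ reachS bd_dict ord_dict left [idx] := by
      refine reachS_subset_closed bd_dict ord_dict left _ _ ?_ ?_ y hy
      · exact fun x hx j hj => reachS_saturated bd_dict ord_dict left [idx] x hx j hj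
      · exact fun x hx => reachS_saturated bd_dict ord_dict left [idx] k hk x hx
    have hyord : (alook ord_dict y).isNone = true :=
      reachS_ord_none bd_dict ord_dict left _ _ (fun x hx => nxt_ord_none bd_dict ord_dict left k x hx) y hy
    obtain ⟨hbd, _⟩ := hwf y hyR hyord
    obtain ⟨ls, hls⟩ := Option.isSome_iff_exists.mp hbd
    exact List.mem_map.mpr ⟨(y, ls), alook_mem _ _ _ hls, rfl⟩
  calc rnk bd_dict ord_dict left k ≤ (bd_dict.map Prod.fst).toFinset.card := Finset.card_le_card hsub
    _ ≤ (bd_dict.map Prod.fst).length := List.toFinset_card_le _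
    _ = bd_dict.length := List.length_map _

theorem pre_to_HB (bd_dict : List (String × List (List String))) (ord_dict : List (String × Int)) (left : Int) (idx : String)
    (hwf : ∀ k ∈ reachS bd_dict ord_dict left [idx], (alook ord_dict k).isNone = true →
      (alook bd_dict k).isSome = true ∧
      (PySem.List.pyGet? ((alook bd_dict k).getD []) left).isSome = true)
    (hacyc : ∀ k ∈ reachS bd_dict ord_dict left [idx], k ∉ reachS bd_dict ord_dict left (nxt bd_dict ord_dict left k)) :
    HB bd_dict ord_dict left idx := by
  intro k hkR hkord
  obtain ⟨hbd, hrowS⟩ := hwf k hkR (by simp [hkord])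
  obtain ⟨ls, hls⟩ := Option.isSome_iff_exists.mp hbd
  rw [hls, Option.getD_some] at hrowS
  obtain ⟨row, hrow⟩ := Option.isSome_iff_exists.mp hrowS
  refine ⟨ls, hls, row, hrow, ?_⟩
  intro i hi
  rcases hio : alook ord_dict i with _ | v
  · have hinxt : i ∈ nxt bd_dict ord_dict left k :=
      (mem_nxt_iff bd_dict ord_dict left k ls row hls hrow i).mpr ⟨hi, by simp [hio]⟩
    have hiR : i ∈ reachS bd_dict ord_dict left [idx] :=
      reachS_saturated bd_dict ord_dict left [idx] k hkR i hinxt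
    refine Or.inr ⟨hiR, (hwf i hiR (by simp [hio])).1, ?_⟩
    exact rnk_lt bd_dict ord_dict left idx hacyc k i hkR hinxt
  · exact Or.inl (by simp)

theorem aRec_ord (bd_dict : List (String × List (List String))) (ord_dict : List (String × Int)) (left : Int)
    (k : String) (v : Int) (h : alook ord_dict k = some v) (f : Nat) (hf : 1 ≤ f) :
    aRec bd_dict ord_dict left f k = [v] := by
  obtain ⟨g, rfl⟩ : ∃ g, f = g + 1 := ⟨f - 1, by omega⟩
  simp [aRec, h]

theorem aRec_stable (bd_dict : List (String × List (List String))) (ord_dict : List (String × Int)) (left : Int) (idx : String)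
    (H : HB bd_dict ord_dict left idx) :
    ∀ r k f₁ f₂, k ∈ reachS bd_dict ord_dict left [idx] → alook ord_dict k = none →
      rnk bd_dict ord_dict left k < r → r ≤ f₁ → r ≤ f₂ →
      aRec bd_dict ord_dict left f₁ k = aRec bd_dict ord_dict left f₂ k := by
  intro r
  induction r with
  | zero => omega
  | succ r ih =>
    intro k f₁ f₂ hkR hord hr h1 h2
    obtain ⟨g₁, rfl⟩ : ∃ g, f₁ = g + 1 := ⟨f₁ - 1, by omega⟩
    obtain ⟨g₂, rfl⟩ : ∃ g, f₂ = g + 1 := ⟨f₂ - 1, by omega⟩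
    obtain ⟨ls, hls, row, hrow, hmem⟩ := H k hkR hord
    simp only [aRec, hord, hls, hrow]
    apply PySem.List.foldl_congr_mem'
    intro i hi od
    rcases hio : alook ord_dict i with _ | v
    · rcases hmem i hi with hio' | ⟨hiR, _, hia⟩
      · simp [hio] at hio'
      · rw [ih i g₁ g₂ hiR hio (by omega) (by omega) (by omega)]
    · simp

theorem aRec_eq_VAL (bd_dict : List (String × List (List String))) (ord_dict : List (String × Int)) (left : Int) (idx : String)
    (H : HB bd_dict ord_dict left idx) (k : String) (f : Nat)
    (hkR : k ∈ reachS bd_dict ord_dict left [idx]) (hord : alook ord_dict k = none)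
    (hle : rnk bd_dict ord_dict left k ≤ bd_dict.length)
    (hf : rnk bd_dict ord_dict left k + 1 ≤ f) :
    aRec bd_dict ord_dict left f k = VAL bd_dict ord_dict left k :=
  aRec_stable bd_dict ord_dict left idx H (rnk bd_dict ord_dict left k + 1) k f (bd_dict.length + 1)
    hkR hord (by omega) hf (by omega)

theorem VAL_ord (bd_dict : List (String × List (List String))) (ord_dict : List (String × Int)) (left : Int)
    (k : String) (v : Int) (h : alook ord_dict k = some v) :
    VAL bd_dict ord_dict left k = [v] :=
  aRec_ord bd_dict ord_dict left k v h _ (by omega)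

theorem VAL_unfold (bd_dict : List (String × List (List String))) (ord_dict : List (String × Int)) (left : Int) (idx : String)
    (H : HB bd_dict ord_dict left idx) (k : String) (ls : List (List String)) (row : List String)
    (hkR : k ∈ reachS bd_dict ord_dict left [idx])
    (hord : alook ord_dict k = none) (hls : alook bd_dict k = some ls)
    (hrow : PySem.List.pyGet? ls left = some row)
    (hle : rnk bd_dict ord_dict left k ≤ bd_dict.length) :
    VAL bd_dict ord_dict left k = row.flatMap (VAL bd_dict ord_dict left) := by
  obtain ⟨ls', hls', row', hrow', hmem⟩ := H k hkR hord
  rw [hls'] at hls; cases hls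
  rw [hrow'] at hrow; cases hrow
  conv_lhs => rw [VAL]
  simp only [aRec, hord, hls', hrow']
  rw [PySem.List.foldl_congr_mem' (g := fun od i => od ++ VAL bd_dict ord_dict left i)]
  · exact PySem.List.foldl_append_eq_flatMap _ _ _
  · intro i hi od
    rcases hio : alook ord_dict i with _ | v
    · rcases hmem i hi with hio' | ⟨hiR, _, hia⟩
      · simp [hio] at hio'
      · rw [aRec_eq_VAL bd_dict ord_dict left idx H i _ hiR hio (by omega) (by omega)]
    · rw [VAL_ord bd_dict ord_dict left i v hio]

theorem bMax_pos (bd_dict : List (String × List (List String))) (left : Int) : 1 ≤ bMax bd_dict left := by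
  unfold bMax
  rw [PySem.List.foldl_add_nat]
  omega

theorem row_lt_bMax (bd_dict : List (String × List (List String))) (left : Int)
    (k : String) (ls : List (List String)) (row : List String)
    (hls : alook bd_dict k = some ls) (hrow : PySem.List.pyGet? ls left = some row) :
    row.length < bMax bd_dict left := by
  have hm : (k, ls) ∈ bd_dict := alook_mem _ _ _ hls
  have hsum : row.length ≤ (bd_dict.map (fun p => ((PySem.List.pyGet? p.2 left).getD []).length)).sum := by
    apply List.le_sum_of_mem
    refine List.mem_map.mpr ⟨(k, ls), hm, ?_⟩
    simp [hrow]
  unfold bMax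
  rw [PySem.List.foldl_add_nat]
  omega

theorem bLoop_nil (bd_dict : List (String × List (List String))) (ord_dict : List (String × Int)) (left : Int)
    (f : Nat) (od : List Int) : bLoop bd_dict ord_dict left f [] od = od := by
  cases f <;> simp [bLoop]

-- drain a list of stack entries one by one, given the one-entry property for each member
theorem bLoop_runMany (bd_dict : List (String × List (List String))) (ord_dict : List (String × Int)) (left : Int)
    (W : Nat) :
    ∀ l : List String,
      (∀ j ∈ l, ∀ f s od, W ≤ f → ∃ g, bLoop bd_dict ord_dict left f (j :: s) od =
          bLoop bd_dict ord_dict left g s (od ++ VAL bd_dict ord_dict left j) ∧ f ≤ g + W) →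
      ∀ f s od, l.length * W ≤ f → ∃ g, bLoop bd_dict ord_dict left f (l ++ s) od =
          bLoop bd_dict ord_dict left g s (od ++ l.flatMap (VAL bd_dict ord_dict left)) ∧ f ≤ g + l.length * W := by
  intro l
  induction l with
  | nil => intro _ f s od _; exact ⟨f, by simp, by omega⟩
  | cons j l' ih =>
    intro HP f s od hf
    have hWf : W ≤ f := by
      have : (j :: l').length * W = l'.length * W + W := by simp [Nat.succ_mul]
      omega
    obtain ⟨g₁, heq₁, hb₁⟩ := HP j (by simp) f (l' ++ s) od hWf
    have hg₁ : l'.length * W ≤ g₁ := by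
      have : (j :: l').length * W = l'.length * W + W := by simp [Nat.succ_mul]
      omega
    obtain ⟨g, heq₂, hb₂⟩ := ih (fun j' hj' => HP j' (by simp [hj'])) g₁ s (od ++ VAL bd_dict ord_dict left j) hg₁
    refine ⟨g, ?_, ?_⟩
    · rw [List.cons_append, heq₁, heq₂]
      simp
    · have : (j :: l').length * W = l'.length * W + W := by simp [Nat.succ_mul]
      omega

theorem bLoop_run (bd_dict : List (String × List (List String))) (ord_dict : List (String × Int)) (left : Int) (idx : String)
    (H : HB bd_dict ord_dict left idx)
    (hle : ∀ k ∈ reachS bd_dict ord_dict left [idx], rnk bd_dict ord_dict left k ≤ bd_dict.length) :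
    ∀ r k f s od,
      ((alook ord_dict k).isSome = true ∨
        (k ∈ reachS bd_dict ord_dict left [idx] ∧ alook ord_dict k = none ∧ rnk bd_dict ord_dict left k < r)) →
      (bMax bd_dict left) ^ r ≤ f →
      ∃ g, bLoop bd_dict ord_dict left f (k :: s) od =
        bLoop bd_dict ord_dict left g s (od ++ VAL bd_dict ord_dict left k) ∧
        f ≤ g + (bMax bd_dict left) ^ r := by
  intro r
  induction r with
  | zero =>
    intro k f s od hk hf
    have h1 : (bMax bd_dict left) ^ (0 : Nat) = 1 := pow_zero _
    rcases hk with hk | ⟨_, _, hk⟩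
    · obtain ⟨v, hv⟩ := Option.isSome_iff_exists.mp hk
      obtain ⟨f', rfl⟩ : ∃ g, f = g + 1 := ⟨f - 1, by omega⟩
      refine ⟨f', ?_, by omega⟩
      simp only [bLoop, hv]
      rw [VAL_ord bd_dict ord_dict left k v hv]
    · omega
  | succ r ih =>
    intro k f s od hk hf
    have hM : 1 ≤ bMax bd_dict left := bMax_pos bd_dict left
    have hMp : 1 ≤ (bMax bd_dict left) ^ (r + 1) := Nat.one_le_pow _ _ hM
    obtain ⟨f', rfl⟩ : ∃ g, f = g + 1 := ⟨f - 1, by omega⟩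
    rcases hio : alook ord_dict k with _ | v
    · rcases hk with hk | ⟨hkR, _, hrk⟩
      · simp [hio] at hk
      · obtain ⟨ls, hls, row, hrow, hmem⟩ := H k hkR hio
        have hrowM : row.length < bMax bd_dict left := row_lt_bMax bd_dict left k ls row hls hrow
        have ha : 1 ≤ (bMax bd_dict left) ^ r := Nat.one_le_pow _ _ hM
        have hmul : row.length * (bMax bd_dict left) ^ r + (bMax bd_dict left) ^ r ≤
            (bMax bd_dict left) ^ (r + 1) := by
          calc row.length * (bMax bd_dict left) ^ r + (bMax bd_dict left) ^ r
              = (row.length + 1) * (bMax bd_dict left) ^ r := by ring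
            _ ≤ (bMax bd_dict left) * (bMax bd_dict left) ^ r := Nat.mul_le_mul_right _ (by omega)
            _ = (bMax bd_dict left) ^ (r + 1) := by ring
        have hfuel : row.length * (bMax bd_dict left) ^ r ≤ f' := by omega
        obtain ⟨g, heq, hb⟩ := bLoop_runMany bd_dict ord_dict left ((bMax bd_dict left) ^ r) row
          (fun j hj f s od hfj => by
            refine ih j f s od ?_ hfj
            rcases hmem j hj with hjo | ⟨hjR, _, hja⟩
            · exact Or.inl hjo
            · rcases hjo : alook ord_dict j with _ | v
              · exact Or.inr ⟨hjR, rfl, by omega⟩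
              · exact Or.inl (by simp))
          f' s od hfuel
        refine ⟨g, ?_, ?_⟩
        · simp only [bLoop, hio, hls, hrow]
          rw [heq, VAL_unfold bd_dict ord_dict left idx H k ls row hkR hio hls hrow (hle k hkR)]
        · omega
    · refine ⟨f', ?_, by omega⟩
      simp only [bLoop, hio]
      rw [VAL_ord bd_dict ord_dict left k v hio]

-- ===== VERDICT (by name: the statement is the Claim_ definition above) =====
theorem get_order_bound_list_py_spec : Claim_equal_get_order_bound_list_py := by
  unfold Claim_equal_get_order_bound_list_py
  intro bd_dict ord_dict idx left _ hpre
  unfold Spec_get_order_bound_list_py get_order_bound_list_py get_order_bound_list_py_alt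
  rcases hio : alook ord_dict idx with _ | v
  · rcases hpre with hpre | ⟨hbd, hwf, hacyc⟩
    · rw [hio] at hpre; simp at hpre
    · have H : HB bd_dict ord_dict left idx := pre_to_HB bd_dict ord_dict left idx hwf hacyc
      have hidxR : idx ∈ reachS bd_dict ord_dict left [idx] :=
        mem_iterS_of_mem bd_dict ord_dict left _ _ idx (by simp)
      have hle : ∀ k ∈ reachS bd_dict ord_dict left [idx], rnk bd_dict ord_dict left k ≤ bd_dict.length :=
        fun k hk => rnk_le bd_dict ord_dict left idx hwf k hk
      obtain ⟨ls, hls, row, hrow, hmem⟩ := H idx hidxR hio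
      simp only [hls, hrow]
      have hM : 1 ≤ bMax bd_dict left := bMax_pos bd_dict left
      have hrowM : row.length < bMax bd_dict left := row_lt_bMax bd_dict left idx ls row hls hrow
      have hfuel : row.length * (bMax bd_dict left) ^ bd_dict.length ≤ bFuel bd_dict left := by
        unfold bFuel
        calc row.length * (bMax bd_dict left) ^ bd_dict.length
            ≤ (bMax bd_dict left) * (bMax bd_dict left) ^ bd_dict.length :=
              Nat.mul_le_mul_right _ (by omega)
          _ = (bMax bd_dict left) ^ (bd_dict.length + 1) := by ring
      obtain ⟨g, heq, _⟩ := bLoop_runMany bd_dict ord_dict left ((bMax bd_dict left) ^ bd_dict.length) row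
        (fun j hj f s od hfj => by
          refine bLoop_run bd_dict ord_dict left idx H hle bd_dict.length j f s od ?_ hfj
          rcases hmem j hj with hjo | ⟨hjR, _, hja⟩
          · exact Or.inl hjo
          · rcases hjo : alook ord_dict j with _ | v
            · refine Or.inr ⟨hjR, rfl, ?_⟩
              have := hle idx hidxR
              omega
            · exact Or.inl (by simp))
        (bFuel bd_dict left) [] [] hfuel
      simp only [List.append_nil] at heq
      rw [heq, bLoop_nil]
      simp only [List.nil_append]
      exact VAL_unfold bd_dict ord_dict left idx H idx ls row hidxR hio hls hrow (hle idx hidxR)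
  · exact aRec_ord bd_dict ord_dict left idx v hio _ (by omega)
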